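-- pv_equiv track=rewrite | github.com/HienHoang1101/nckh-jssp | algorithms/bnb/propagation.py | jackson_preemptive
-- ===== SOURCE A (Python) =====
-- import heapq
--
-- def jackson_preemptive(rs: list[int], ps: list[int], qs: list[int]) -> int:
--     """1|r_j,q_j,pmtn|Cmax. Returns max(C_j+q_j). O(n log n)."""
--     n = len(rs)
--     if n == 0: return 0
--     order = sorted(range(n), key=lambda i: rs[i])
--     pq: list[tuple[int,int,int]] = []  # (-q, rem_p, idx)
--     ji = 0; t = rs[order[0]]; cmax = 0
--     while pq or ji < n:
--         while ji < n and rs[order[ji]] <= t: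
--             j = order[ji]; heapq.heappush(pq, (-qs[j], ps[j], j)); ji += 1
--         if not pq:
--             if ji < n: t = rs[order[ji]]; continue
--             else: break
--         nq, rp, idx = heapq.heappop(pq)
--         nxt = rs[order[ji]] if ji < n else t + rp
--         avail = nxt - t
--         if avail >= rp:
--             t += rp; cmax = max(cmax, t + (-nq))
--         else:
--             t = nxt; heapq.heappush(pq, (nq, rp - avail, idx))
--     return cmax
-- ===== SOURCE B (Python) =====
-- def _pick(avail):
--     # job with the smallest heap key (-q, rem_p, idx): max q, ties by rem_p then idx
--     best = avail[0]
--     for c in avail[1:]: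
--         if (-c[1], c[0], c[2]) < (-best[1], best[0], best[2]):
--             best = c
--     return best
--
--
-- def _run_until(avail, t, stop, cmax):
--     """Run highest-priority available jobs up to time `stop`; preempt the running
--     job at `stop` if it does not finish. Returns the new (avail, t, cmax)."""
--     while avail:
--         best = _pick(avail)
--         avail = [x for x in avail if x is not best]
--         rp, q, i = best
--         if stop - t >= rp:
--             t += rp
--             cmax = max(cmax, t + q)
--             if t == stop:
--                 break
--         else:
--             avail = avail + [(rp - (stop - t), q, i)]
--             t = stop
--             break
--     return avail, t, cmax
--
--
-- def _drain(avail, t, cmax):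
--     # no releases left: complete every available job in priority order
--     while avail:
--         best = _pick(avail)
--         avail = [x for x in avail if x is not best]
--         rp, q, i = best
--         t += rp
--         cmax = max(cmax, t + q)
--     return cmax
--
--
-- def jackson_preemptive(rs: list[int], ps: list[int], qs: list[int]) -> int:
--     """1|r_j,q_j,pmtn|Cmax by Jackson's rule, decomposed into release-time
--     segments: between consecutive release events a plain list of available jobs
--     is run greedily (linear-scan pick), then the released job is admitted."""
--     n = len(rs)
--     if n == 0:
--         return 0
--     order = sorted(range(n), key=lambda i: rs[i])
--     jobs = [(rs[i], ps[i], qs[i], i) for i in order]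
--     avail = []  # (rem_p, q, idx)
--     t = jobs[0][0]
--     cmax = 0
--     for r, p, q, i in jobs:
--         if t < r:
--             avail, t, cmax = _run_until(avail, t, r, cmax)
--             if t < r:
--                 t = r
--         avail = avail + [(p, q, i)]
--     return _drain(avail, t, cmax)
-- ===== Notes on version B (the rewrite author's own statement) =====
-- stated objective: alternative
-- what changed: Replaces A's single heap-driven while-loop by a two-phase decomposition: a for-loop over release events that, before each release, runs the currently-available jobs (kept in a plain list, best job found by a linear scan) up to that release time with preemption, followed by a final drain phase that completes the remaining jobs in priority order; the heapq priority queue disappears.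
import Mathlib
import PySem

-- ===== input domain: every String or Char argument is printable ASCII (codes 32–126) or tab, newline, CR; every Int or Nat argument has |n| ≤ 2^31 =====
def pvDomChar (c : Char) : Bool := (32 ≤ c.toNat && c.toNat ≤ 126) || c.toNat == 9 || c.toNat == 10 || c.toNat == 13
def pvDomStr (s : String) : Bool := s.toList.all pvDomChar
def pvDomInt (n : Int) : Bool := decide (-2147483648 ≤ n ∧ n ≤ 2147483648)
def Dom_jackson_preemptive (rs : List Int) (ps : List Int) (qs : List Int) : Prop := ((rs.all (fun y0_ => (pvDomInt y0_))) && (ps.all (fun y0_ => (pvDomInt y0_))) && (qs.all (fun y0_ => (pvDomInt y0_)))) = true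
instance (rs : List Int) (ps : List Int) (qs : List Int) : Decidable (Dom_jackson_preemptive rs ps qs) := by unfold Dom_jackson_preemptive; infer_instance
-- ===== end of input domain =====

-- B replaces A's single heap-driven while-loop by a two-phase decomposition: a pass
-- over the release events with a per-segment preemptive run of a plain availability
-- list, followed by a final drain; same return value (objective: alternative).

-- ===== PORT A =====
-- Python tuple order on (-q, rem_p, idx): heapq compares lexicographically.
def tLtB (x y : Int × Int × Int) : Bool :=
  decide (x.1 < y.1) ||
    (x.1 == y.1 && (decide (x.2.1 < y.2.1) || (x.2.1 == y.2.1 && decide (x.2.2 < y.2.2))))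

-- heapq modelled as a sorted list: heappush = ordered insert, heappop = take the head.
def pushSorted (x : Int × Int × Int) : List (Int × Int × Int) → List (Int × Int × Int)
  | [] => [x]
  | y :: ys => if tLtB x y then x :: y :: ys else y :: pushSorted x ys

-- the `while pq or ji < n` loop of A, the inner admitting while folded into the recursion;
-- the loop runs at most 3*n+1 iterations (each step admits a job, pops one, or advances t
-- to the next release), so the fuel passed by jackson_preemptive is never exhausted
def loopA (rs ps qs : List Int) (order : List Nat) (n : Nat) :
    Nat → Nat → Int → List (Int × Int × Int) → Int → Int
  | 0, _, _, _, cmax => cmax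
  | fuel + 1, ji, t, pq, cmax =>
    if ji < n ∧ rs.getD (order.getD ji 0) 0 ≤ t then
      let j := order.getD ji 0
      loopA rs ps qs order n fuel (ji + 1) t
        (pushSorted (-(qs.getD j 0), ps.getD j 0, (j : Int)) pq) cmax
    else
      match pq with
      | [] =>
        if ji < n then loopA rs ps qs order n fuel ji (rs.getD (order.getD ji 0) 0) [] cmax
        else cmax
      | v :: rest =>
        if ji < n then
          -- nxt = rs[order[ji]]
          if rs.getD (order.getD ji 0) 0 - t ≥ v.2.1 then
            loopA rs ps qs order n fuel ji (t + v.2.1) rest (max cmax (t + v.2.1 + (-v.1)))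
          else
            loopA rs ps qs order n fuel ji (rs.getD (order.getD ji 0) 0)
              (pushSorted (v.1, v.2.1 - (rs.getD (order.getD ji 0) 0 - t), v.2.2) rest) cmax
        else
          -- nxt = t + rem_p, so avail = rem_p and the job completes
          loopA rs ps qs order n fuel ji (t + v.2.1) rest (max cmax (t + v.2.1 + (-v.1)))

def jackson_preemptive (rs : List Int) (ps : List Int) (qs : List Int) : Int :=
  let n := rs.length
  if n = 0 then 0
  else
    let order := PySem.List.sorted (List.range n) (fun i => rs.getD i 0) false
    loopA rs ps qs order n (3 * n + 2) 0 (rs.getD (order.getD 0 0) 0) [] 0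

-- ===== PORT B =====
-- B's _pick compares the tuples (rem_p, q, idx) by the key (-q, rem_p, idx).
def keyLt (c b : Int × Int × Int) : Bool :=
  decide (-c.2.1 < -b.2.1) ||
    ((-c.2.1 : Int) == -b.2.1 &&
      (decide (c.1 < b.1) || (c.1 == b.1 && decide (c.2.2 < b.2.2))))

-- the `best = avail[0]; for c in avail[1:]: ...` scan of B's _pick
def pickB (x : Int × Int × Int) (xs : List (Int × Int × Int)) : Int × Int × Int :=
  xs.foldl (fun b c => if keyLt c b then c else b) x

-- the pick is an element of the scanned list (used for termination below)
theorem pickB_mem (xs : List (Int × Int × Int)) (x : Int × Int × Int) :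
    pickB x xs ∈ x :: xs := by
  induction xs generalizing x with
  | nil => simp [pickB]
  | cons y ys ih =>
    have h := ih (if keyLt y x then y else x)
    simp only [pickB, List.foldl_cons] at h ⊢
    by_cases hp : keyLt y x = true
    · rw [if_pos hp] at h ⊢
      rcases List.mem_cons.mp h with h' | h' <;> simp [h']
    · rw [if_neg hp] at h ⊢
      rcases List.mem_cons.mp h with h' | h' <;> simp [h']

-- B's _run_until: run picked jobs until `stop`, preempting the last one there
def runUntil (t stop cmax : Int) :
    List (Int × Int × Int) → List (Int × Int × Int) × Int × Int
  | [] => ([], t, cmax)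
  | x :: xs =>
    let best := pickB x xs
    let rest := (x :: xs).erase best
    if stop - t ≥ best.1 then
      if t + best.1 = stop then (rest, t + best.1, max cmax (t + best.1 + best.2.1))
      else runUntil (t + best.1) stop (max cmax (t + best.1 + best.2.1)) rest
    else (rest ++ [(best.1 - (stop - t), best.2.1, best.2.2)], stop, cmax)
  termination_by l => l.length
  decreasing_by
    have hm : pickB x xs ∈ x :: xs := pickB_mem xs x
    have := List.length_erase_of_mem hm
    simp only [this]
    simp

-- B's _drain: complete every remaining job in pick order
def drainB (t cmax : Int) : List (Int × Int × Int) → Int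
  | [] => cmax
  | x :: xs =>
    let best := pickB x xs
    drainB (t + best.1) (max cmax (t + best.1 + best.2.1)) ((x :: xs).erase best)
  termination_by l => l.length
  decreasing_by
    have hm : pickB x xs ∈ x :: xs := pickB_mem xs x
    have := List.length_erase_of_mem hm
    simp only [this]
    simp

-- B's `for r, p, q, i in jobs` event loop (runUntil of an empty list is the identity)
def outerB : List (Int × Int × Int × Int) → List (Int × Int × Int) → Int → Int → Int
  | [], avail, t, cmax => drainB t cmax avail
  | (r, p, q, i) :: rest, avail, t, cmax =>
    if r ≤ t then outerB rest (avail ++ [(p, q, i)]) t cmax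
    else
      match runUntil t r cmax avail with
      | (av', t', cm') => outerB rest (av' ++ [(p, q, i)]) (if t' < r then r else t') cm'

def jackson_preemptive_alt (rs : List Int) (ps : List Int) (qs : List Int) : Int :=
  let n := rs.length
  if n = 0 then 0
  else
    let order := PySem.List.sorted (List.range n) (fun i => rs.getD i 0) false
    let jobs := order.map (fun i => (rs.getD i 0, ps.getD i 0, qs.getD i 0, (i : Int)))
    outerB jobs [] (rs.getD (order.getD 0 0) 0) 0

-- ===== PRECONDITION & SPEC =====
-- Pre_ excludes only inputs where Python A raises IndexError: ps or qs shorter than rs.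
def Pre_jackson_preemptive (rs : List Int) (ps : List Int) (qs : List Int) : Prop :=
  rs.length ≤ ps.length ∧ rs.length ≤ qs.length
instance (rs : List Int) (ps : List Int) (qs : List Int) : Decidable (Pre_jackson_preemptive rs ps qs) := by unfold Pre_jackson_preemptive; infer_instance

def pvWitness_jackson_preemptive : List Int × List Int × List Int :=
  ([0, 2, 1], [2, 1, 3], [1, 5, 2])

def Spec_jackson_preemptive (rs : List Int) (ps : List Int) (qs : List Int) (out : Int) : Prop := out = jackson_preemptive_alt rs ps qs
instance (rs : List Int) (ps : List Int) (qs : List Int) (out : Int) : Decidable (Spec_jackson_preemptive rs ps qs out) := by unfold Spec_jackson_preemptive; infer_instance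

-- ===== CLAIM (what is proved, stated in full; the proofs are below) =====
def Claim_equal_jackson_preemptive : Prop := ∀ (rs : List Int) (ps : List Int) (qs : List Int), Dom_jackson_preemptive rs ps qs → Pre_jackson_preemptive rs ps qs → Spec_jackson_preemptive rs ps qs (jackson_preemptive rs ps qs)

-- ===== LEMMAS AND PROOFS =====

-- fAB maps A's heap tuple (-q, rem_p, idx) to B's list tuple (rem_p, q, idx)
def fAB (v : Int × Int × Int) : Int × Int × Int := (v.2.1, -v.1, v.2.2)

theorem keyLt_fAB (a b : Int × Int × Int) : keyLt (fAB a) (fAB b) = tLtB a b := by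
  rcases a with ⟨a1, a2, a3⟩; rcases b with ⟨b1, b2, b3⟩
  simp only [keyLt, tLtB, fAB, neg_neg]
  rfl

theorem keyLt_irrefl (a : Int × Int × Int) : keyLt a a = false := by
  rcases a with ⟨a1, a2, a3⟩; simp [keyLt]

theorem keyLt_total (a b : Int × Int × Int) (h1 : keyLt a b = false)
    (h2 : keyLt b a = false) : a = b := by
  rcases a with ⟨a1, a2, a3⟩; rcases b with ⟨b1, b2, b3⟩
  simp [keyLt] at h1 h2
  simp only [Prod.mk.injEq]
  omega

theorem keyLt_asymm (a b : Int × Int × Int) (h : keyLt a b = true) : keyLt b a = false := by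
  rcases a with ⟨a1, a2, a3⟩; rcases b with ⟨b1, b2, b3⟩
  simp [keyLt] at h ⊢
  omega

theorem keyLt_negtrans (a b c : Int × Int × Int) (h1 : keyLt a b = false)
    (h2 : keyLt b c = false) : keyLt a c = false := by
  rcases a with ⟨a1, a2, a3⟩; rcases b with ⟨b1, b2, b3⟩; rcases c with ⟨c1, c2, c3⟩
  simp [keyLt] at h1 h2 ⊢
  omega

-- no element of the scanned list is strictly below the pick
theorem pickB_min (xs : List (Int × Int × Int)) (x : Int × Int × Int) :
    ∀ z ∈ x :: xs, keyLt z (pickB x xs) = false := by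
  induction xs generalizing x with
  | nil =>
    intro z hz; simp at hz; subst hz
    simpa [pickB] using keyLt_irrefl z
  | cons y ys ih =>
    intro z hz
    have hrec : pickB x (y :: ys) = pickB (if keyLt y x then y else x) ys := rfl
    rw [hrec]
    have hself : keyLt (if keyLt y x then y else x)
        (pickB (if keyLt y x then y else x) ys) = false := ih _ _ (by simp)
    rcases List.mem_cons.mp hz with rfl | hz'
    · by_cases hp : keyLt y z = true
      · rw [if_pos hp] at hself ⊢
        exact keyLt_negtrans _ _ _ (keyLt_asymm _ _ hp) hself
      · rw [if_neg hp] at hself ⊢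
        exact hself
    · rcases List.mem_cons.mp hz' with rfl | hz''
      · by_cases hp : keyLt z x = true
        · rw [if_pos hp] at hself ⊢
          exact hself
        · rw [if_neg hp] at hself ⊢
          exact keyLt_negtrans _ _ _ (by simpa using hp) hself
      · by_cases hp : keyLt y x = true
        · rw [if_pos hp]; exact ih y z (by simp [hz''])
        · rw [if_neg hp]; exact ih x z (by simp [hz''])

-- if m is in the list and no element is strictly below m, the scan finds exactly m
theorem pickB_eq (xs : List (Int × Int × Int)) (x m : Int × Int × Int)
    (hm : m ∈ x :: xs) (hmin : ∀ z ∈ x :: xs, keyLt z m = false) :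
    pickB x xs = m := by
  have hrmem : pickB x xs ∈ x :: xs := pickB_mem xs x
  exact keyLt_total _ m (hmin _ hrmem) (pickB_min xs x m hm)

theorem pushSorted_perm (x : Int × Int × Int) (l : List (Int × Int × Int)) :
    (pushSorted x l).Perm (x :: l) := by
  induction l with
  | nil => simp [pushSorted]
  | cons y ys ih =>
    simp only [pushSorted]
    split
    · exact List.Perm.refl _
    · exact (ih.cons y).trans (List.Perm.swap x y ys)

theorem tLt_asymm (a b : Int × Int × Int) (h : tLtB a b = true) : tLtB b a = false := by
  rcases a with ⟨a1, a2, a3⟩; rcases b with ⟨b1, b2, b3⟩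
  simp [tLtB] at h ⊢
  omega

theorem tLt_negtrans (a b c : Int × Int × Int) (h1 : tLtB a b = false)
    (h2 : tLtB b c = false) : tLtB a c = false := by
  rcases a with ⟨a1, a2, a3⟩; rcases b with ⟨b1, b2, b3⟩; rcases c with ⟨c1, c2, c3⟩
  simp [tLtB] at h1 h2 ⊢
  omega

def SortedA (l : List (Int × Int × Int)) : Prop :=
  l.Pairwise (fun a b => tLtB b a = false)

theorem sortedA_pushSorted (x : Int × Int × Int) (l : List (Int × Int × Int))
    (h : SortedA l) : SortedA (pushSorted x l) := by
  induction l with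
  | nil => simp [SortedA, pushSorted]
  | cons y ys ih =>
    rcases List.pairwise_cons.mp h with ⟨hy, hys⟩
    simp only [SortedA, pushSorted]
    split
    · rename_i hxy
      refine List.pairwise_cons.mpr ⟨?_, h⟩
      intro z hz
      rcases List.mem_cons.mp hz with rfl | hz
      · exact tLt_asymm _ _ hxy
      · exact tLt_negtrans _ _ _ (hy z hz) (tLt_asymm _ _ hxy)
    · rename_i hxy
      refine List.pairwise_cons.mpr ⟨?_, ih hys⟩
      intro z hz
      have hz' := (pushSorted_perm x ys).mem_iff.mp hz
      rcases List.mem_cons.mp hz' with rfl | hz'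
      · simpa using hxy
      · exact hy z hz'

-- head of A's sorted heap is exactly what B's linear scan selects
theorem pickB_of_perm (v : Int × Int × Int) (rest : List (Int × Int × Int))
    (x : Int × Int × Int) (xs : List (Int × Int × Int))
    (hs : SortedA (v :: rest)) (hperm : (x :: xs).Perm ((v :: rest).map fAB)) :
    pickB x xs = fAB v := by
  apply pickB_eq
  · exact hperm.mem_iff.mpr (by simp)
  · intro z hz
    have hz' := hperm.mem_iff.mp hz
    simp only [List.map_cons, List.mem_cons, List.mem_map] at hz'
    rcases hz' with rfl | ⟨u, hu, rfl⟩
    · exact keyLt_irrefl _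
    · rw [keyLt_fAB]
      exact (List.pairwise_cons.mp hs).1 u hu

-- one-step unfoldings of A's loop
theorem loopA_succ_nil (rs ps qs : List Int) (order : List Nat) (n fuel ji : Nat) (t cmax : Int) :
    loopA rs ps qs order n (fuel + 1) ji t [] cmax =
      if ji < n ∧ rs.getD (order.getD ji 0) 0 ≤ t then
        loopA rs ps qs order n fuel (ji + 1) t
          (pushSorted (-(qs.getD (order.getD ji 0) 0), ps.getD (order.getD ji 0) 0,
            ((order.getD ji 0 : Nat) : Int)) []) cmax
      else if ji < n then loopA rs ps qs order n fuel ji (rs.getD (order.getD ji 0) 0) [] cmax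
      else cmax := rfl

theorem loopA_succ_cons (rs ps qs : List Int) (order : List Nat) (n fuel ji : Nat) (t cmax : Int)
    (v : Int × Int × Int) (rest : List (Int × Int × Int)) :
    loopA rs ps qs order n (fuel + 1) ji t (v :: rest) cmax =
      if ji < n ∧ rs.getD (order.getD ji 0) 0 ≤ t then
        loopA rs ps qs order n fuel (ji + 1) t
          (pushSorted (-(qs.getD (order.getD ji 0) 0), ps.getD (order.getD ji 0) 0,
            ((order.getD ji 0 : Nat) : Int)) (v :: rest)) cmax
      else if ji < n then
        if rs.getD (order.getD ji 0) 0 - t ≥ v.2.1 then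
          loopA rs ps qs order n fuel ji (t + v.2.1) rest (max cmax (t + v.2.1 + (-v.1)))
        else
          loopA rs ps qs order n fuel ji (rs.getD (order.getD ji 0) 0)
            (pushSorted (v.1, v.2.1 - (rs.getD (order.getD ji 0) 0 - t), v.2.2) rest) cmax
      else loopA rs ps qs order n fuel ji (t + v.2.1) rest (max cmax (t + v.2.1 + (-v.1))) := rfl

-- one-step unfolding of B's _run_until
theorem runUntil_cons (t stop cmax : Int) (x : Int × Int × Int)
    (xs : List (Int × Int × Int)) :
    runUntil t stop cmax (x :: xs) =
      (if stop - t ≥ (pickB x xs).1 then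
        if t + (pickB x xs).1 = stop then
          ((x :: xs).erase (pickB x xs), t + (pickB x xs).1,
            max cmax (t + (pickB x xs).1 + (pickB x xs).2.1))
        else runUntil (t + (pickB x xs).1) stop
          (max cmax (t + (pickB x xs).1 + (pickB x xs).2.1)) ((x :: xs).erase (pickB x xs))
      else ((x :: xs).erase (pickB x xs) ++
        [((pickB x xs).1 - (stop - t), (pickB x xs).2.1, (pickB x xs).2.2)], stop, cmax)) := by
  rw [runUntil]

-- one-step unfolding of B's _drain
theorem drainB_cons (t cmax : Int) (x : Int × Int × Int) (xs : List (Int × Int × Int)) :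
    drainB t cmax (x :: xs) =
      drainB (t + (pickB x xs).1) (max cmax (t + (pickB x xs).1 + (pickB x xs).2.1))
        ((x :: xs).erase (pickB x xs)) := by
  rw [drainB]

-- unfoldings of B's event loop
theorem outerB_nil (avail : List (Int × Int × Int)) (t cmax : Int) :
    outerB [] avail t cmax = drainB t cmax avail := rfl

theorem outerB_cons (r p q i : Int) (rest : List (Int × Int × Int × Int))
    (avail : List (Int × Int × Int)) (t cmax : Int) :
    outerB ((r, p, q, i) :: rest) avail t cmax =
      if r ≤ t then outerB rest (avail ++ [(p, q, i)]) t cmax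
      else
        outerB rest ((runUntil t r cmax avail).1 ++ [(p, q, i)])
          (if (runUntil t r cmax avail).2.1 < r then r else (runUntil t r cmax avail).2.1)
          (runUntil t r cmax avail).2.2 := rfl

-- B's event step absorbs exactly one pick of the segment runner
theorem outerB_runStep (r p q i : Int) (jrest : List (Int × Int × Int × Int))
    (x : Int × Int × Int) (xs : List (Int × Int × Int)) (t cmax : Int) (ht : t < r) :
    outerB ((r, p, q, i) :: jrest) (x :: xs) t cmax =
      (if r - t ≥ (pickB x xs).1 then
        outerB ((r, p, q, i) :: jrest) ((x :: xs).erase (pickB x xs))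
          (t + (pickB x xs).1) (max cmax (t + (pickB x xs).1 + (pickB x xs).2.1))
      else
        outerB ((r, p, q, i) :: jrest)
          ((x :: xs).erase (pickB x xs) ++
            [((pickB x xs).1 - (r - t), (pickB x xs).2.1, (pickB x xs).2.2)]) r cmax) := by
  have hnr : ¬ r ≤ t := by omega
  by_cases hc : r - t ≥ (pickB x xs).1
  · rw [if_pos hc]
    by_cases hfin : t + (pickB x xs).1 = r
    · -- the pick finishes exactly at the release: both sides admit next
      rw [outerB_cons, if_neg hnr, runUntil_cons, if_pos hc, if_pos hfin]
      rw [hfin, outerB_cons, if_pos (le_refl r)]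
      simp
    · have hlt : t + (pickB x xs).1 < r := by omega
      rw [outerB_cons, if_neg hnr, runUntil_cons, if_pos hc, if_neg hfin]
      rw [outerB_cons, if_neg (by omega : ¬ r ≤ t + (pickB x xs).1)]
  · rw [if_neg hc]
    rw [outerB_cons, if_neg hnr, runUntil_cons, if_neg hc]
    rw [outerB_cons, if_pos (le_refl r)]
    simp

-- head decomposition of the job list B iterates over
theorem jobs_drop_cons (order : List Nat) (f : Nat → Int × Int × Int × Int)
    (ji : Nat) (h : ji < order.length) :
    (order.drop ji).map f = f (order.getD ji 0) :: (order.drop (ji + 1)).map f := by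
  rw [List.drop_eq_getElem_cons h, List.getD_eq_getElem order 0 h]
  rfl

-- the main simulation: A's fuel loop over (ji, t, sorted heap) against B's event loop
-- over the remaining job list with an unordered availability list holding the same jobs
theorem loop_eq (rs ps qs : List Int) (order : List Nat)
    (hlen : order.length = rs.length) :
    ∀ (fuel ji : Nat) (t : Int) (pqA : List (Int × Int × Int)) (cmax : Int)
      (pqB : List (Int × Int × Int)), SortedA pqA → pqB.Perm (pqA.map fAB) →
      3 * (rs.length - ji) + pqA.length +
        (if ji < rs.length ∧ rs.getD (order.getD ji 0) 0 ≤ t then 0 else 1) ≤ fuel →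
      loopA rs ps qs order rs.length fuel ji t pqA cmax =
        outerB ((order.drop ji).map
          (fun i => (rs.getD i 0, ps.getD i 0, qs.getD i 0, (i : Int)))) pqB t cmax := by
  intro fuel
  induction fuel with
  | zero =>
    intro ji t pqA cmax pqB _ _ hm
    exfalso
    split at hm <;> omega
  | succ fuel ih =>
    intro ji t pqA cmax pqB hs hperm hm
    have admit_eq : ∀ (h1 : ji < rs.length ∧ rs.getD (order.getD ji 0) 0 ≤ t),
        outerB ((order.drop ji).map
            (fun i => (rs.getD i 0, ps.getD i 0, qs.getD i 0, (i : Int)))) pqB t cmax =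
          outerB ((order.drop (ji + 1)).map
            (fun i => (rs.getD i 0, ps.getD i 0, qs.getD i 0, (i : Int))))
            (pqB ++ [(ps.getD (order.getD ji 0) 0, qs.getD (order.getD ji 0) 0,
              ((order.getD ji 0 : Nat) : Int))]) t cmax := by
      intro h1
      rw [jobs_drop_cons order _ ji (hlen ▸ h1.1), outerB_cons, if_pos h1.2]
    have hperm_admit : ∀ (pq : List (Int × Int × Int)), pqB.Perm (pq.map fAB) →
        (pqB ++ [(ps.getD (order.getD ji 0) 0, qs.getD (order.getD ji 0) 0,
            ((order.getD ji 0 : Nat) : Int))]).Perm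
          ((pushSorted (-(qs.getD (order.getD ji 0) 0), ps.getD (order.getD ji 0) 0,
            ((order.getD ji 0 : Nat) : Int)) pq).map fAB) := by
      intro pq hp
      refine (List.perm_append_singleton _ _).trans ?_
      refine (hp.cons _).trans ?_
      refine List.Perm.trans ?_ ((pushSorted_perm _ pq).map fAB).symm
      simp only [List.map_cons, fAB, neg_neg]
      exact List.Perm.refl _
    rcases pqA with _ | ⟨v, restA⟩
    · -- empty availability
      have hB : pqB = [] := List.Perm.eq_nil (by simpa using hperm)
      subst hB
      rw [loopA_succ_nil]
      by_cases h1 : ji < rs.length ∧ rs.getD (order.getD ji 0) 0 ≤ t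
      · -- A admits job order[ji]; B's event loop admits the same job
        rw [if_pos h1] at hm
        rw [if_pos h1, admit_eq h1]
        refine ih (ji + 1) t _ cmax _ (sortedA_pushSorted _ _ (by simp [SortedA]))
          (hperm_admit [] (by simp)) ?_
        have hlp : (pushSorted (-(qs.getD (order.getD ji 0) 0), ps.getD (order.getD ji 0) 0,
            ((order.getD ji 0 : Nat) : Int)) ([] : List (Int × Int × Int))).length = 1 :=
          (pushSorted_perm _ []).length_eq
        rw [hlp]
        have := h1.1
        simp at hm
        split <;> omega
      · -- A idles to the next release or terminates
        rw [if_neg h1] at hm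
        rw [if_neg h1]
        by_cases h2 : ji < rs.length
        · rw [if_pos h2]
          have hr : t < rs.getD (order.getD ji 0) 0 := by
            rcases lt_or_ge t (rs.getD (order.getD ji 0) 0) with h | h
            · exact h
            · exact absurd ⟨h2, by omega⟩ h1
          have hmeas : 3 * (rs.length - ji) + ([] : List (Int × Int × Int)).length +
              (if ji < rs.length ∧ rs.getD (order.getD ji 0) 0 ≤ rs.getD (order.getD ji 0) 0
                then 0 else 1) ≤ fuel := by
            rw [if_pos ⟨h2, le_refl _⟩]; simp at hm ⊢; omega
          have hre := ih ji (rs.getD (order.getD ji 0) 0) [] cmax [] (by simp [SortedA])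
            (by simp) hmeas
          rw [hre]
          rw [jobs_drop_cons order _ ji (hlen ▸ h2)]
          conv_lhs => rw [outerB_cons]
          rw [if_pos (le_refl _)]
          conv_rhs => rw [outerB_cons]
          rw [if_neg (by omega : ¬ rs.getD (order.getD ji 0) 0 ≤ t)]
          simp only [runUntil]
          rw [if_pos hr]
        · rw [if_neg h2]
          rw [List.drop_eq_nil_of_le (by omega)]
          simp [outerB_nil, drainB]
    · -- nonempty availability
      rcases hBne : pqB with _ | ⟨x, xs⟩
      · exfalso; rw [hBne] at hperm; have := hperm.symm.eq_nil; simp at this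
      subst hBne
      rw [loopA_succ_cons]
      by_cases h1 : ji < rs.length ∧ rs.getD (order.getD ji 0) 0 ≤ t
      · -- A admits job order[ji]; B's event loop admits the same job
        rw [if_pos h1] at hm
        rw [if_pos h1, admit_eq h1]
        refine ih (ji + 1) t _ cmax _ (sortedA_pushSorted _ _ hs)
          (hperm_admit (v :: restA) hperm) ?_
        have hlp : (pushSorted (-(qs.getD (order.getD ji 0) 0), ps.getD (order.getD ji 0) 0,
            ((order.getD ji 0 : Nat) : Int)) (v :: restA)).length = (v :: restA).length + 1 :=
          (pushSorted_perm _ _).length_eq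
        rw [hlp]
        have := h1.1
        simp at hm ⊢
        split <;> omega
      · -- A pops the heap head, B picks the same job
        rw [if_neg h1] at hm
        rw [if_neg h1]
        have hpick : pickB x xs = fAB v := pickB_of_perm v restA x xs hs hperm
        have herase : ((x :: xs).erase (fAB v)).Perm (restA.map fAB) := by
          have h1' := hperm.erase (fAB v)
          simp only [List.map_cons, List.erase_cons_head] at h1'
          simpa [fAB] using h1'
        have hsrest : SortedA restA := (List.pairwise_cons.mp hs).2
        by_cases h2 : ji < rs.length
        · rw [if_pos h2]
          have hr : t < rs.getD (order.getD ji 0) 0 := by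
            rcases lt_or_ge t (rs.getD (order.getD ji 0) 0) with h | h
            · exact h
            · exact absurd ⟨h2, by omega⟩ h1
          rw [jobs_drop_cons order _ ji (hlen ▸ h2)]
          rw [outerB_runStep _ _ _ _ _ x xs t cmax hr, hpick]
          simp only [fAB]
          by_cases hcmp : rs.getD (order.getD ji 0) 0 - t ≥ v.2.1
          · -- the picked job completes before (or at) the next release
            rw [if_pos hcmp, if_pos hcmp]
            have hmeas : 3 * (rs.length - ji) + restA.length +
                (if ji < rs.length ∧ rs.getD (order.getD ji 0) 0 ≤ t + v.2.1
                  then 0 else 1) ≤ fuel := by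
              simp at hm; split <;> omega
            have hre := ih ji (t + v.2.1) restA (max cmax (t + v.2.1 + (-v.1)))
              ((x :: xs).erase (fAB v)) hsrest herase hmeas
            rw [hre, jobs_drop_cons order _ ji (hlen ▸ h2)]
            simp [fAB]
          · -- the picked job is preempted at the next release
            rw [if_neg hcmp, if_neg hcmp]
            have hre := ih ji (rs.getD (order.getD ji 0) 0)
              (pushSorted (v.1, v.2.1 - (rs.getD (order.getD ji 0) 0 - t), v.2.2) restA) cmax
              ((x :: xs).erase (fAB v) ++
                [(v.2.1 - (rs.getD (order.getD ji 0) 0 - t), -v.1, v.2.2)])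
              (sortedA_pushSorted _ _ hsrest) ?_ ?_
            · rw [hre, jobs_drop_cons order _ ji (hlen ▸ h2)]
              simp [fAB]
            · refine (List.perm_append_singleton _ _).trans ?_
              refine (herase.cons _).trans ?_
              have hp := (pushSorted_perm
                (v.1, v.2.1 - (rs.getD (order.getD ji 0) 0 - t), v.2.2) restA).map fAB
              simpa [fAB] using hp.symm
            · have hlp : (pushSorted (v.1, v.2.1 - (rs.getD (order.getD ji 0) 0 - t), v.2.2)
                  restA).length = restA.length + 1 := (pushSorted_perm _ restA).length_eq
              rw [hlp, if_pos ⟨h2, le_refl _⟩]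
              simp at hm
              omega
        · -- no releases left: A completes the head, B's drain picks the same job
          rw [if_neg h2]
          rw [List.drop_eq_nil_of_le (by omega)]
          have hmeas : 3 * (rs.length - ji) + restA.length +
              (if ji < rs.length ∧ rs.getD (order.getD ji 0) 0 ≤ t + v.2.1
                then 0 else 1) ≤ fuel := by
            rw [if_neg (fun hc => h2 hc.1)]; simp at hm; omega
          have hre := ih ji (t + v.2.1) restA (max cmax (t + v.2.1 + (-v.1)))
            ((x :: xs).erase (fAB v)) hsrest herase hmeas
          rw [hre, List.drop_eq_nil_of_le (by omega)]
          simp only [List.map_nil]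
          rw [outerB_nil, outerB_nil, drainB_cons, hpick]
          simp [fAB]

-- ===== VERDICT (by name: the statement is the Claim_ definition above) =====
theorem jackson_preemptive_spec : Claim_equal_jackson_preemptive := by
  intro rs ps qs _ _
  unfold Spec_jackson_preemptive jackson_preemptive jackson_preemptive_alt
  by_cases h : rs.length = 0
  · simp [h]
  · simp only [h, if_false]
    have hlen : (PySem.List.sorted (List.range rs.length)
        (fun i => rs.getD i 0) false).length = rs.length := by
      rw [PySem.List.length_sorted, List.length_range]
    have := loop_eq rs ps qs _ hlen (3 * rs.length + 2) 0
      (rs.getD ((PySem.List.sorted (List.range rs.length)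
        (fun i => rs.getD i 0) false).getD 0 0) 0) [] 0 []
      (by simp [SortedA]) (by simp) (by simp only [List.length_nil]; split <;> omega)
    simpa using this
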